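-- pv_equiv track=rewrite | github.com/lqx-AI/code_my | 早餐组合.py | breakfastNumber
-- ===== SOURCE A (Python) =====
-- def breakfastNumber(staple, drinks, x):
--     sum=0
--     for i in staple :
--         for j in drinks:
--             if i+j<=x:
--                 sum+=1#不用声明全局变量
--             else:
--                 continue #break不对
--     return sum # 位置不同结果不一样
-- ===== SOURCE B (Python) =====
-- def breakfastNumber(staple, drinks, x):
--     # Sort drinks once; for each staple, binary-search the count of affordable drinks.
--     ds = sorted(drinks)
--     n = len(ds)
--     total = 0
--     for i in staple:
--         t = x - i
--         lo, hi = 0, n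
--         while lo < hi:
--             mid = (lo + hi) // 2
--             if ds[mid] <= t:
--                 lo = mid + 1
--             else:
--                 hi = mid
--         total += lo
--     return total
-- ===== Notes on version B (the rewrite author's own statement) =====
-- stated objective: faster
-- what changed: Replaces the nested scan over all staple-drink pairs by sorting drinks once and binary-searching, per staple, the number of drinks with price <= x - staple.
import Mathlib
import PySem

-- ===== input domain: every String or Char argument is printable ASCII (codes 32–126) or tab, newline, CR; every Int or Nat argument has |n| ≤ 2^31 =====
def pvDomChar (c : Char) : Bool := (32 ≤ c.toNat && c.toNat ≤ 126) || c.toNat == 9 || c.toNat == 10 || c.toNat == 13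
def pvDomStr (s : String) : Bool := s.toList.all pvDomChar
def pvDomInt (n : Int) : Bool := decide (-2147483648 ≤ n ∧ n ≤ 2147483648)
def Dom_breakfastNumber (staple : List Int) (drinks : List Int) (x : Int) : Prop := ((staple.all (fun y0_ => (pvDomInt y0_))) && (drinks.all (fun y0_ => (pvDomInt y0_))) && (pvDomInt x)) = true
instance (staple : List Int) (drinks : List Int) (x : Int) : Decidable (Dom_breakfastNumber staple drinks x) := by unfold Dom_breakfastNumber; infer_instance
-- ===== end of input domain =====

-- B sorts drinks once and binary-searches a threshold per staple instead of A's nested pair scan.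

-- ===== PORT A =====
def breakfastNumber (staple : List Int) (drinks : List Int) (x : Int) : Int :=
  staple.foldl (fun s i => drinks.foldl (fun s j => if i + j ≤ x then s + 1 else s) s) 0

-- ===== PORT B =====
-- hand-written binary search of Source B (the while lo < hi loop), structurally recursive on a
-- fuel that bounds the remaining interval (hi - lo halves each step, so hi - lo fuel suffices);
-- ds[mid] is always in range when 0 ≤ lo ≤ hi ≤ ds.length, so getD is exact there
def bnBisF (ds : List Int) (t : Int) : Nat → Nat → Nat → Nat
  | 0, lo, _ => lo
  | fuel + 1, lo, hi =>
    if lo < hi then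
      let mid := (lo + hi) / 2
      if ds.getD mid 0 ≤ t then bnBisF ds t fuel (mid + 1) hi else bnBisF ds t fuel lo mid
    else lo

def bnBis (ds : List Int) (t : Int) (lo hi : Nat) : Nat :=
  bnBisF ds t (hi - lo) lo hi

def breakfastNumber_alt (staple : List Int) (drinks : List Int) (x : Int) : Int :=
  let ds := PySem.List.sorted drinks (fun j => j) false
  staple.foldl (fun total i => total + (bnBis ds (x - i) 0 ds.length : Int)) 0

-- ===== PRECONDITION & SPEC =====
def Spec_breakfastNumber (staple : List Int) (drinks : List Int) (x : Int) (out : Int) : Prop := out = breakfastNumber_alt staple drinks x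
instance (staple : List Int) (drinks : List Int) (x : Int) (out : Int) : Decidable (Spec_breakfastNumber staple drinks x out) := by unfold Spec_breakfastNumber; infer_instance

-- ===== CLAIM (what is proved, stated in full; the proofs are below) =====
def Claim_equal_breakfastNumber : Prop := ∀ (staple : List Int) (drinks : List Int) (x : Int), Dom_breakfastNumber staple drinks x → Spec_breakfastNumber staple drinks x (breakfastNumber staple drinks x)

-- ===== LEMMAS AND PROOFS =====

-- a list on which a predicate holds exactly at indices < lo has countP = lo
theorem countP_eq_of_index_split (ds : List Int) (p : Int → Bool) (lo : Nat)
    (hlo : lo ≤ ds.length)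
    (h : ∀ k (hk : k < ds.length), p ds[k] = decide (k < lo)) :
    ds.countP p = lo := by
  induction ds generalizing lo with
  | nil => simp only [List.length_nil] at hlo; simp only [List.countP_nil]; omega
  | cons d t ih =>
    cases lo with
    | zero =>
      have hd : p d = false := by simpa using h 0 (by simp)
      have ht : t.countP p = 0 := by
        refine ih 0 (Nat.zero_le _) ?_
        intro k hk
        simpa using h (k + 1) (by simpa using Nat.succ_lt_succ hk)
      simp [hd, ht]
    | succ lo' =>
      have hd : p d = true := by simpa using h 0 (by simp)
      have ht : t.countP p = lo' := by
        refine ih lo' (by simpa using hlo) ?_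
        intro k hk
        simpa using h (k + 1) (by simpa using Nat.succ_lt_succ hk)
      simp [hd, ht]

-- binary-search invariant: on the sorted drinks list, bnBis returns the number of elements ≤ t
theorem bnBisF_eq_countP (drinks : List Int) (t : Int) (fuel lo hi : Nat)
    (hfuel : hi - lo ≤ fuel)
    (hhi : hi ≤ (PySem.List.sorted drinks (fun j => j) false).length)
    (hlohi : lo ≤ hi)
    (hlow : ∀ k (hk : k < (PySem.List.sorted drinks (fun j => j) false).length),
        k < lo → (PySem.List.sorted drinks (fun j => j) false)[k] ≤ t)
    (hhigh : ∀ k (hk : k < (PySem.List.sorted drinks (fun j => j) false).length),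
        hi ≤ k → t < (PySem.List.sorted drinks (fun j => j) false)[k]) :
    bnBisF (PySem.List.sorted drinks (fun j => j) false) t fuel lo hi
      = (PySem.List.sorted drinks (fun j => j) false).countP (fun j => decide (j ≤ t)) := by
  set ds := PySem.List.sorted drinks (fun j => j) false with hds
  induction fuel generalizing lo hi with
  | zero =>
    simp only [bnBisF]
    refine (countP_eq_of_index_split ds _ lo (by omega) ?_).symm
    intro k hk
    by_cases hklt : k < lo
    · simpa [hklt] using hlow k hk hklt
    · have := hhigh k hk (by omega)
      simp [hklt]
      omega
  | succ f ih =>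
    rw [bnBisF]
    by_cases hlt : lo < hi
    · have hmid1 : lo ≤ (lo + hi) / 2 := by omega
      have hmid2 : (lo + hi) / 2 < hi := by omega
      have hmlen : (lo + hi) / 2 < ds.length := by omega
      have hget : ds.getD ((lo + hi) / 2) 0 = ds[(lo + hi) / 2] := List.getD_eq_getElem ds 0 hmlen
      simp only [hlt, if_true]
      by_cases hc : ds[(lo + hi) / 2] ≤ t
      · rw [if_pos (by rw [hget]; exact hc)]
        refine ih ((lo + hi) / 2 + 1) hi ?_ ?_ ?_ ?_ ?_
        all_goals try omega
        intro k hk hklt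
        calc ds[k] ≤ ds[(lo + hi) / 2] := by
              have := PySem.List.sorted_id_getElem_mono (xs := drinks) (p := k)
                (q := (lo + hi) / 2) (by omega) (by simpa [hds] using hmlen)
              simpa [hds] using this
          _ ≤ t := hc
      · rw [if_neg (by rw [hget]; exact hc)]
        have hmt : t < ds[(lo + hi) / 2] := by omega
        refine ih lo ((lo + hi) / 2) ?_ ?_ ?_ ?_ ?_
        all_goals try omega
        intro k hk hkge
        calc t < ds[(lo + hi) / 2] := hmt
          _ ≤ ds[k] := by
              have := PySem.List.sorted_id_getElem_mono (xs := drinks)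
                (p := (lo + hi) / 2) (q := k) hkge (by simpa [hds] using hk)
              simpa [hds] using this
    · simp only [hlt, if_false]
      refine (countP_eq_of_index_split ds _ lo (by omega) ?_).symm
      intro k hk
      by_cases hklt : k < lo
      · simpa [hklt] using hlow k hk hklt
      · have := hhigh k hk (by omega)
        simp [hklt]
        omega

-- inner loop of A counts the affordable drinks
theorem inner_eq_countP (drinks : List Int) (i x : Int) (s : Int) :
    drinks.foldl (fun s j => if i + j ≤ x then s + 1 else s) s
      = s + (drinks.countP (fun j => decide (i + j ≤ x)) : Int) := by
  simpa using PySem.List.foldl_ite_add_one (l := drinks) (p := fun j => i + j ≤ x) (a := s)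

theorem per_staple_eq (drinks : List Int) (i x : Int) :
    ((bnBis (PySem.List.sorted drinks (fun j => j) false) (x - i) 0
        (PySem.List.sorted drinks (fun j => j) false).length : Nat) : Int)
      = (drinks.countP (fun j => decide (i + j ≤ x)) : Int) := by
  unfold bnBis
  have h := bnBisF_eq_countP drinks (x - i) ((PySem.List.sorted drinks (fun j => j) false).length - 0) 0
    (PySem.List.sorted drinks (fun j => j) false).length (le_refl _)
    (le_refl _) (Nat.zero_le _) (by intro k hk hklt; omega) (by intro k hk hge; omega)
  rw [h]
  have hperm : (PySem.List.sorted drinks (fun j => j) false).Perm drinks :=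
    PySem.List.sorted_perm drinks _ _
  rw [hperm.countP_eq]
  congr 1
  exact List.countP_congr (fun j _ => by constructor <;> (intro hj; simp at hj ⊢; omega))

theorem folds_eq (staple drinks : List Int) (x : Int) (acc : Int) :
    staple.foldl (fun s i => drinks.foldl (fun s j => if i + j ≤ x then s + 1 else s) s) acc
      = staple.foldl (fun total i => total +
          (bnBis (PySem.List.sorted drinks (fun j => j) false) (x - i) 0
            (PySem.List.sorted drinks (fun j => j) false).length : Int)) acc := by
  induction staple generalizing acc with
  | nil => rfl
  | cons i t ih =>
    simp only [List.foldl_cons]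
    rw [inner_eq_countP, ih, per_staple_eq]

-- ===== VERDICT (by name: the statement is the Claim_ definition above) =====
theorem breakfastNumber_spec : Claim_equal_breakfastNumber := by
  intro staple drinks x _
  unfold Spec_breakfastNumber breakfastNumber breakfastNumber_alt
  exact folds_eq staple drinks x 0
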